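-- pv_equiv track=rewrite | github.com/benquick123/code-profiling | code/izpiti/izpit01a/M-17061-1302.py | roboti
-- ===== SOURCE A (Python) =====
-- def roboti(navodila, n):
--     navodila_seznam = list(navodila)
--     vsi_roboti = []
--     for r in range(n):
--         vsi_roboti.append(Robot())
--     c = 0
--     for navodilo in navodila_seznam:
--         if c == n:
--             c = 0
--
--         if navodilo=="V":
--             vsi_roboti[c].x+=1
--         if navodilo == "J":
--             vsi_roboti[c].y -= 1
--         if navodilo == "Z":
--             vsi_roboti[c].x -= 1
--         if navodilo == "S":
--             vsi_roboti[c].y += 1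
--
--         c += 1
--
--     koordinate = []
--     for r in vsi_roboti:
--         koordinate.append((r.koordinate()))
--     return koordinate
--
-- class Robot:
--     def __init__(self):
--         self.x = self.y = 0
--         self.smer = 1
--
--     def desno(self):
--         self.smer = (self.smer + 1) % 4
--
--     def levo(self):
--         self.smer = (self.smer - 1) % 4
--
--     def naprej(self, d):
--         if self.smer == 0:
--             self.y += d
--         elif self.smer == 1:
--             self.x += d
--         elif self.smer == 2:
--             self.y -= d
--         else:
--             self.x -= d
--
--     def koordinate(self):
--         return self.x, self.y
--
--     def razdalja(self):
--         return abs(self.x) + abs(self.y)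
-- ===== SOURCE B (Python) =====
-- def roboti(navodila, n):
--     s = list(navodila)
--     out = []
--     for r in range(n):
--         part = s[r::n]
--         out.append((part.count('V') - part.count('Z'),
--                     part.count('S') - part.count('J')))
--     return out
-- ===== Notes on version B (the rewrite author's own statement) =====
-- stated objective: alternative
-- what changed: Replaces A's single interleaved pass that mutates Robot objects under a round-robin counter by n independent strided slices s[r::n], computing each robot's coordinates directly as count('V')-count('Z') and count('S')-count('J').
import Mathlib
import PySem

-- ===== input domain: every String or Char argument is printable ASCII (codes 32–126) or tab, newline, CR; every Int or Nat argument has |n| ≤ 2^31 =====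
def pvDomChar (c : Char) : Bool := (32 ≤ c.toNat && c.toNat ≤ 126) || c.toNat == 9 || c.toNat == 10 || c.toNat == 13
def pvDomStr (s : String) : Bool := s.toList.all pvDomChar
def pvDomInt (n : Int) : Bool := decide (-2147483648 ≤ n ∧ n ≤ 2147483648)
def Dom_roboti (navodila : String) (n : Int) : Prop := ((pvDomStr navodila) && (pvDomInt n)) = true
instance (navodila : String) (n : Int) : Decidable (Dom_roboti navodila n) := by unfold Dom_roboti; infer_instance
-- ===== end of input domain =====

-- B replaces A's interleaved distributing pass over mutable Robot objects by n per-robot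
-- strided slices s[r::n] with direct character counts (different decomposition, same cost).


-- ===== PORT A =====
-- Robot class of the Python module (only x, y, smer fields; koordinate() = (x, y)).
structure PyRobot where
  x : Int
  y : Int
  smer : Int
deriving Repr, DecidableEq

-- Robot.__init__
def robotInit : PyRobot := { x := 0, y := 0, smer := 1 }

-- vsi_roboti[c].<field> update.  Python raises IndexError when c is out of range, which is
-- reachable only for n ≤ 0 together with an instruction character — exactly what Pre_roboti
-- excludes; inside Pre_roboti the index is always in range, so List.modify is exact there.
def modR (l : List PyRobot) (c : Int) (f : PyRobot → PyRobot) : List PyRobot :=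
  if 0 ≤ c then l.modify c.toNat f else l

-- the four independent `if navodilo == …` statements of A's loop body
def applyCh (vsi : List PyRobot) (c : Int) (ch : Char) : List PyRobot :=
  let v1 := if ch == 'V' then modR vsi c (fun r => { r with x := r.x + 1 }) else vsi
  let v2 := if ch == 'J' then modR v1 c (fun r => { r with y := r.y - 1 }) else v1
  let v3 := if ch == 'Z' then modR v2 c (fun r => { r with x := r.x - 1 }) else v2
  if ch == 'S' then modR v3 c (fun r => { r with y := r.y + 1 }) else v3

-- one iteration of A's `for navodilo in navodila_seznam` loop (state: vsi_roboti, c)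
def stepA (n : Int) (st : List PyRobot × Int) (ch : Char) : List PyRobot × Int :=
  let c := if st.2 == n then 0 else st.2
  (applyCh st.1 c ch, c + 1)

def roboti (navodila : String) (n : Int) : List (Int × Int) :=
  let navodila_seznam := navodila.toList
  let vsi_roboti := (PySem.List.pyRange 0 n 1).map (fun _ => robotInit)
  let res := navodila_seznam.foldl (stepA n) (vsi_roboti, 0)
  res.1.map (fun r => (r.x, r.y))

-- ===== PORT B =====
def roboti_alt (navodila : String) (n : Int) : List (Int × Int) :=
  let s := navodila.toList
  (PySem.List.pyRange 0 n 1).foldl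
    (fun out r =>
      -- part = s[r::n]; slice? is none only for step 0, and r ranges over range(n), so n ≠ 0 here
      let part := (PySem.List.slice? s (some r) none n).getD []
      out ++ [((part.count 'V' : Int) - (part.count 'Z' : Int),
               (part.count 'S' : Int) - (part.count 'J' : Int))])
    []

-- ===== PRECONDITION & SPEC =====
-- Pre_roboti excludes exactly the inputs where Python A raises IndexError: n ≤ 0 while
-- navodila contains an instruction character 'V'/'J'/'Z'/'S' (A then indexes an empty list).
def Pre_roboti (navodila : String) (n : Int) : Prop :=
  0 < n ∨ ∀ c ∈ navodila.toList, c ∉ (['V', 'J', 'Z', 'S'] : List Char)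
instance (navodila : String) (n : Int) : Decidable (Pre_roboti navodila n) := by
  unfold Pre_roboti; infer_instance

def pvWitness_roboti : String × Int := ("VJZS KxV", 3)

def Spec_roboti (navodila : String) (n : Int) (out : List (Int × Int)) : Prop :=
  out = roboti_alt navodila n
instance (navodila : String) (n : Int) (out : List (Int × Int)) : Decidable (Spec_roboti navodila n out) := by
  unfold Spec_roboti; infer_instance

-- ===== CLAIM (what is proved, stated in full; the proofs are below) =====
def Claim_equal_roboti : Prop := ∀ (navodila : String) (n : Int), Dom_roboti navodila n → Pre_roboti navodila n → Spec_roboti navodila n (roboti navodila n)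

-- ===== LEMMAS AND PROOFS =====

-- displacement of a single instruction character, applied to one robot
def addD (ch : Char) (r : PyRobot) : PyRobot :=
  { x := r.x + ((if ch = 'V' then 1 else 0) - (if ch = 'Z' then 1 else 0)),
    y := r.y + ((if ch = 'S' then 1 else 0) - (if ch = 'J' then 1 else 0)),
    smer := r.smer }

-- processing a run of characters assigned to consecutive robots c, c+1, …
def updSeq (vsi : List PyRobot) (c : Nat) : List Char → List PyRobot
  | [] => vsi
  | ch :: t => updSeq (applyCh vsi (c : Int) ch) (c + 1) t

-- the elements of s[k::N] for 0 ≤ k, 0 < N, written over Nat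
def stride (xs : List Char) (k N : Nat) : List Char :=
  (List.range ((xs.length - k + N - 1) / N)).map (fun j => xs.getD (k + N * j) ' ')

theorem length_modR (l : List PyRobot) (c : Int) (f : PyRobot → PyRobot) :
    (modR l c f).length = l.length := by
  unfold modR; split <;> simp

theorem length_applyCh (vsi : List PyRobot) (c : Int) (ch : Char) :
    (applyCh vsi c ch).length = vsi.length := by
  unfold applyCh
  split <;> split <;> split <;> split <;> simp [length_modR]

theorem applyCh_getD (vsi : List PyRobot) (k j : Nat) (ch : Char) (hk : k < vsi.length) :
    (applyCh vsi (k : Int) ch).getD j robotInit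
      = if j = k then addD ch (vsi.getD j robotInit) else vsi.getD j robotInit := by
  have h0 : (0 : Int) ≤ (k : Int) := Int.natCast_nonneg k
  by_cases hj : j < vsi.length
  · by_cases hV : ch = 'V'
    · subst hV
      simp only [applyCh, modR, if_pos h0, Int.toNat_natCast]
      simp [hj, addD]
      split <;> simp_all [eq_comm]
    · by_cases hJ : ch = 'J'
      · subst hJ
        simp only [applyCh, modR, if_pos h0, Int.toNat_natCast]
        simp [hj, addD]
        split <;> simp_all [eq_comm] <;> ring
      · by_cases hZ : ch = 'Z'
        · subst hZ
          simp only [applyCh, modR, if_pos h0, Int.toNat_natCast]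
          simp [hj, addD]
          split <;> simp_all [eq_comm] <;> ring
        · by_cases hS : ch = 'S'
          · subst hS
            simp only [applyCh, modR, if_pos h0, Int.toNat_natCast]
            simp [hj, addD]
            split <;> simp_all [eq_comm]
          · have bV : (ch == 'V') = false := by simpa using hV
            have bJ : (ch == 'J') = false := by simpa using hJ
            have bZ : (ch == 'Z') = false := by simpa using hZ
            have bS : (ch == 'S') = false := by simpa using hS
            simp [applyCh, bV, bJ, bZ, bS, addD, hV, hJ, hZ, hS]
  · have hlen : vsi.length ≤ j := Nat.le_of_not_lt hj
    have hne : j ≠ k := by omega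
    rw [if_neg hne]
    have h1 : (applyCh vsi (k : Int) ch).length ≤ j := by
      rw [length_applyCh]; exact hlen
    rw [List.getD_eq_default _ _ h1, List.getD_eq_default _ _ hlen]

theorem length_updSeq (l : List Char) (vsi : List PyRobot) (c : Nat) :
    (updSeq vsi c l).length = vsi.length := by
  induction l generalizing vsi c with
  | nil => rfl
  | cons ch t ih => simp [updSeq, ih, length_applyCh]

theorem updSeq_getD (l : List Char) (vsi : List PyRobot) (c k : Nat)
    (hk : k < vsi.length) (hcl : c + l.length ≤ vsi.length) :
    (updSeq vsi c l).getD k robotInit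
      = if c ≤ k ∧ k < c + l.length then addD (l.getD (k - c) ' ') (vsi.getD k robotInit)
        else vsi.getD k robotInit := by
  induction l generalizing vsi c with
  | nil => simp [updSeq]
  | cons ch t ih =>
    simp only [List.length_cons] at hcl ⊢
    have hc : c < vsi.length := by omega
    have hk' : k < (applyCh vsi (c : Int) ch).length := by rwa [length_applyCh]
    have hcl' : (c + 1) + t.length ≤ (applyCh vsi (c : Int) ch).length := by
      rw [length_applyCh]; omega
    rw [updSeq, ih _ _ hk' hcl', applyCh_getD _ _ _ _ hc]
    by_cases hck : k = c
    · subst hck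
      rw [if_neg (by omega), if_pos rfl, if_pos (by omega)]
      simp
    · rw [if_neg hck]
      by_cases hin : c + 1 ≤ k ∧ k < c + 1 + t.length
      · rw [if_pos hin, if_pos (by omega)]
        have : k - c = (k - (c + 1)) + 1 := by omega
        rw [this, List.getD_cons_succ]
      · rw [if_neg hin, if_neg (by omega)]

theorem foldA_eq (n : Int) (l : List Char) (vsi : List PyRobot) (c : Nat)
    (h : (c : Int) + l.length ≤ n) :
    l.foldl (stepA n) (vsi, (c : Int)) = (updSeq vsi c l, (c : Int) + l.length) := by
  induction l generalizing vsi c with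
  | nil => simp [updSeq]
  | cons ch t ih =>
    have hcn : ((c : Int) == n) = false := by
      simp only [List.length_cons] at h
      simp only [beq_eq_false_iff_ne, ne_eq]
      intro hEq
      have : (0 : Int) ≤ (t.length : Int) := Int.natCast_nonneg _
      omega
    have hstep : stepA n (vsi, (c : Int)) ch = (applyCh vsi (c : Int) ch, (c : Int) + 1) := by
      simp [stepA, hcn]
    rw [List.foldl_cons, hstep]
    have h1 : ((c : Int) + 1) = ((c + 1 : Nat) : Int) := by push_cast; ring
    rw [h1, ih _ (c + 1) (by simp only [List.length_cons] at h; push_cast at h ⊢; omega)]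
    simp only [updSeq, List.length_cons, Prod.mk.injEq, true_and]
    push_cast; ring

theorem fold_reset (n : Int) (s : List Char) (vsi : List PyRobot) :
    (s.foldl (stepA n) (vsi, n)).1 = (s.foldl (stepA n) (vsi, 0)).1 := by
  cases s with
  | nil => rfl
  | cons ch t =>
    simp only [List.foldl_cons, stepA]
    simp

theorem stride_ge (xs : List Char) (k N : Nat) (hN : 0 < N) (h : xs.length ≤ k) :
    stride xs k N = [] := by
  unfold stride
  have h1 : xs.length - k = 0 := by omega
  rw [h1]
  have h2 : (0 + N - 1) / N = 0 := Nat.div_eq_of_lt (by omega)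
  rw [h2]
  simp

theorem stride_lt (xs : List Char) (k N : Nat) (hN : 0 < N) (h : k < xs.length) :
    stride xs k N = xs.getD k ' ' :: stride xs (k + N) N := by
  unfold stride
  have h1 : xs.length - k + N - 1 = (xs.length - k - 1) + N := by omega
  have h2 : (xs.length - (k + N) + N - 1) / N = (xs.length - k - 1) / N := by
    by_cases hm : k + N ≤ xs.length
    · have e : xs.length - (k + N) + N - 1 = xs.length - k - 1 := by omega
      rw [e]
    · have e0 : xs.length - (k + N) = 0 := by omega
      rw [e0, Nat.div_eq_of_lt (by omega), Nat.div_eq_of_lt (by omega)]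
  rw [h1, Nat.add_div_right _ hN, h2, List.range_succ_eq_map]
  simp only [List.map_cons, Nat.mul_zero, Nat.add_zero, List.map_map]
  congr 1
  apply List.map_congr_left
  intro j _
  simp only [Function.comp_apply]
  congr 1
  rw [Nat.mul_succ]
  omega

theorem stride_drop (xs : List Char) (j N : Nat) (_hN : 0 < N) :
    stride xs (j + N) N = stride (xs.drop N) j N := by
  unfold stride
  have hlen : (xs.drop N).length = xs.length - N := List.length_drop
  have h1 : xs.length - (j + N) = xs.length - N - j := by omega
  rw [hlen, h1]
  apply List.map_congr_left
  intro i _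
  have : j + N + N * i = N + (j + N * i) := by ring
  rw [this]
  rw [List.getD_eq_getElem?_getD, List.getD_eq_getElem?_getD, List.getElem?_drop]

theorem sliceD_eq (xs : List Char) (k N : Nat) (hN : 0 < N) :
    (PySem.List.slice? xs (some (k : Int)) none (N : Int)).getD [] = stride xs k N := by
  have hN0 : ¬((N : Int) = 0) := by omega
  have hNneg : ¬((N : Int) < 0) := by omega
  have hk0 : ¬((k : Int) < 0) := by omega
  unfold PySem.List.slice? PySem.List.sliceIndices
  simp only [if_neg hN0, if_neg hNneg, if_neg hk0, Option.getD_some]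
  by_cases hk : k < xs.length
  · have hmin : min (k : Int) (xs.length : Int) = (k : Int) := min_eq_left (by omega)
    simp only [hmin]
    rw [if_pos (by omega : (0 : Int) < (N : Int)), if_pos (by omega : (k : Int) < (xs.length : Int))]
    have hcast : ((xs.length : Int) - ↑k + ↑N - 1) = ((xs.length - k + N - 1 : Nat) : Int) := by
      omega
    rw [hcast]
    have hdiv : (((xs.length - k + N - 1 : Nat) : Int) / (N : Int)).toNat
        = (xs.length - k + N - 1) / N := rfl
    rw [hdiv]
    unfold stride
    have hpt : ∀ j ∈ List.range ((xs.length - k + N - 1) / N),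
        xs[((k : Int) + ↑N * ↑j).toNat]? = some (xs.getD (k + N * j) ' ') := by
      intro j hj
      rw [List.mem_range] at hj
      have hcnt : xs.length - k + N - 1 = (xs.length - k - 1) + N := by omega
      rw [hcnt, Nat.add_div_right _ hN] at hj
      have hj' : j ≤ (xs.length - k - 1) / N := by omega
      have hle : N * j ≤ xs.length - k - 1 :=
        le_trans (Nat.mul_le_mul_left N hj')
          (by rw [Nat.mul_comm]; exact Nat.div_mul_le_self _ _)
      have hidx : k + N * j < xs.length := by omega
      have hto : ((k : Int) + ↑N * ↑j).toNat = k + N * j := by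
        rw [show ((k : Int) + ↑N * ↑j) = ((k + N * j : Nat) : Int) by push_cast; ring,
          Int.toNat_natCast]
      rw [hto, List.getElem?_eq_getElem hidx, List.getD_eq_getElem _ _ hidx]
    rw [List.filterMap_congr hpt]
    exact congrFun List.filterMap_eq_map _
  · have hmin : min (k : Int) (xs.length : Int) = (xs.length : Int) := min_eq_right (by omega)
    simp only [hmin]
    rw [if_pos (by omega : (0 : Int) < (N : Int)), if_neg (by omega : ¬ ((xs.length : Int) < (xs.length : Int)))]
    rw [stride_ge xs k N hN (by omega)]
    simp

theorem map_koord_eq_range (vsi : List PyRobot) :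
    vsi.map (fun r => (r.x, r.y))
      = (List.range vsi.length).map
          (fun k => ((vsi.getD k robotInit).x, (vsi.getD k robotInit).y)) := by
  apply List.ext_getElem
  · simp
  · intro i h1 h2
    simp only [List.getElem_map, List.getElem_range]
    rw [List.getD_eq_getElem _ _ (by simpa using h1)]

theorem cnt_cons_int (a c : Char) (p : List Char) :
    (((a :: p).count c : Nat) : Int) = (p.count c : Int) + (if a = c then 1 else 0) := by
  rw [List.count_cons]
  by_cases h : a = c
  · simp [h]
  · simp [h, beq_eq_false_iff_ne.mpr h]

theorem main_fold (N : Nat) (hN : 0 < N) (m : Nat) (s : List Char) (vsi : List PyRobot)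
    (hs : s.length = m) (hv : vsi.length = N) :
    ((s.foldl (stepA (N : Int)) (vsi, 0)).1).map (fun r => (r.x, r.y))
      = (List.range N).map (fun k =>
          ((vsi.getD k robotInit).x
              + (((stride s k N).count 'V' : Int) - ((stride s k N).count 'Z' : Int)),
           (vsi.getD k robotInit).y
              + (((stride s k N).count 'S' : Int) - ((stride s k N).count 'J' : Int)))) := by
  induction m using Nat.strong_induction_on generalizing s vsi with
  | _ m ih =>
  by_cases hm : m < N
  · have hfold : s.foldl (stepA (N : Int)) (vsi, ((0 : Nat) : Int))
        = (updSeq vsi 0 s, ((0 : Nat) : Int) + s.length) :=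
      foldA_eq (N : Int) s vsi 0 (by rw [hs]; push_cast; omega)
    rw [show ((0 : Nat) : Int) = 0 from rfl] at hfold
    rw [hfold]
    have hlen : (updSeq vsi 0 s).length = N := by rw [length_updSeq, hv]
    rw [map_koord_eq_range, hlen]
    apply List.map_congr_left
    intro k hk
    rw [List.mem_range] at hk
    have hkv : k < vsi.length := by omega
    rw [updSeq_getD s vsi 0 k hkv (by rw [hv]; omega)]
    by_cases hks : k < m
    · rw [if_pos ⟨Nat.zero_le _, by omega⟩]
      rw [stride_lt s k N hN (by omega), stride_ge s (k + N) N hN (by omega)]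
      simp only [Nat.sub_zero, addD, cnt_cons_int, List.count_nil, Nat.cast_zero,
        Prod.mk.injEq]
      constructor <;> ring
    · rw [if_neg (by omega)]
      rw [stride_ge s k N hN (by omega)]
      simp
  · have hlen_take : (s.take N).length = N := by rw [List.length_take]; omega
    conv_lhs => rw [← List.take_append_drop N s]
    rw [List.foldl_append]
    rw [show (0 : Int) = ((0 : Nat) : Int) from rfl,
      foldA_eq (N : Int) (s.take N) vsi 0 (by rw [hlen_take]; push_cast; omega)]
    rw [show (((0 : Nat) : Int) + ((s.take N).length : Int)) = (N : Int) by
      rw [hlen_take]; push_cast; ring]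
    rw [fold_reset]
    rw [ih (m - N) (by omega) (s.drop N) (updSeq vsi 0 (s.take N))
      (by rw [List.length_drop]; omega) (by rw [length_updSeq]; exact hv)]
    apply List.map_congr_left
    intro k hk
    rw [List.mem_range] at hk
    have hkv : k < vsi.length := by omega
    rw [updSeq_getD (s.take N) vsi 0 k hkv (by rw [hlen_take, hv]; omega)]
    rw [if_pos ⟨Nat.zero_le _, by rw [hlen_take]; omega⟩]
    have hgetD : (s.take N).getD (k - 0) ' ' = s.getD k ' ' := by
      have h1 : k < (s.take N).length := by rw [hlen_take]; omega
      rw [Nat.sub_zero, List.getD_eq_getElem _ _ h1,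
        List.getD_eq_getElem _ _ (by omega : k < s.length), List.getElem_take]
    rw [hgetD]
    rw [stride_lt s k N hN (by omega), stride_drop s k N hN]
    simp only [addD, cnt_cons_int, Prod.mk.injEq]
    constructor <;> ring

theorem applyCh_nil (c : Int) (ch : Char) : applyCh [] c ch = [] := by
  simp only [applyCh, modR, List.modify_nil]
  split <;> split <;> split <;> split <;> simp

theorem fold_nilrobots (n : Int) (s : List Char) (c : Int) :
    (s.foldl (stepA n) ([], c)).1 = [] := by
  induction s generalizing c with
  | nil => rfl
  | cons ch t ih => simp [stepA, applyCh_nil, ih]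

-- ===== VERDICT (by name: the statement is the Claim_ definition above) =====
theorem roboti_spec : Claim_equal_roboti := by
  intro navodila n _ _
  unfold Spec_roboti
  simp only [roboti, roboti_alt]
  by_cases hn : 0 < n
  · have hN : n = ((n.toNat : Nat) : Int) := (Int.toNat_of_nonneg (le_of_lt hn)).symm
    have hNpos : 0 < n.toNat := by omega
    rw [hN]
    have hlen : ((PySem.List.pyRange 0 ((n.toNat : Nat) : Int) 1).map
        (fun _ => robotInit)).length = n.toNat := by
      rw [List.length_map, PySem.List.length_pyRange_one]
      omega
    rw [main_fold n.toNat hNpos navodila.toList.length navodila.toList _ rfl hlen]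
    rw [PySem.List.foldl_append_singleton_eq_map, List.nil_append]
    rw [PySem.List.pyRange_one]
    simp only [List.map_map, Int.sub_zero, Int.toNat_natCast]
    apply List.map_congr_left
    intro k hk
    rw [List.mem_range] at hk
    simp only [Function.comp_apply, zero_add]
    rw [sliceD_eq navodila.toList k n.toNat hNpos]
    simp only [Function.comp_def, robotInit]
    simp
  · rw [PySem.List.pyRange_one_eq_nil (by omega : n ≤ 0)]
    simp only [List.map_nil, List.foldl_nil]
    rw [fold_nilrobots]
    rfl
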